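-- pv_equiv track=rewrite | github.com/camargodev/advent-of-code-2023 | day-14/src/part_2/rolling_stones.py | shift_to_west
-- ===== SOURCE A (Python) =====
-- CUBE_STONE = "#"
--
-- SPACE = "."
--
-- def shift_to_west(stones):
--     shifted_stones = []
--     for stone_line_idx in range(len(stones)):
--         shifted_parts = []
--         str_stone_line = "".join(list(stones[stone_line_idx]))
--         for part in str_stone_line.split(CUBE_STONE):
--             grouped_stones = part.replace(SPACE, "")
--             empty_size = len(part) - len(grouped_stones)
--             shifted_parts.append(grouped_stones + (SPACE * empty_size))
--         str_shifted_line = CUBE_STONE.join(shifted_parts)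
--         shifted_line = [char for char in str_shifted_line]
--         shifted_stones.append(shifted_line)
--
--     return shifted_stones
-- ===== SOURCE B (Python) =====
-- def shift_to_west(stones):
--     result = []
--     for row in stones:
--         out = []
--         dots = 0
--         for ch in "".join(row):
--             if ch == "#":
--                 out.extend("." * dots)
--                 out.append("#")
--                 dots = 0
--             elif ch == ".":
--                 dots += 1
--             else:
--                 out.append(ch)
--         out.extend("." * dots)
--         result.append(out)
--     return result
-- ===== Notes on version B (the rewrite author's own statement) =====
-- stated objective: simpler
-- what changed: Replaces the split('#')/replace('.','')/join staged string pipeline with a single left-to-right pass per row that emits movable characters immediately and keeps only a pending-dot counter, flushed at each '#' and at the end of the row.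
import Mathlib
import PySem

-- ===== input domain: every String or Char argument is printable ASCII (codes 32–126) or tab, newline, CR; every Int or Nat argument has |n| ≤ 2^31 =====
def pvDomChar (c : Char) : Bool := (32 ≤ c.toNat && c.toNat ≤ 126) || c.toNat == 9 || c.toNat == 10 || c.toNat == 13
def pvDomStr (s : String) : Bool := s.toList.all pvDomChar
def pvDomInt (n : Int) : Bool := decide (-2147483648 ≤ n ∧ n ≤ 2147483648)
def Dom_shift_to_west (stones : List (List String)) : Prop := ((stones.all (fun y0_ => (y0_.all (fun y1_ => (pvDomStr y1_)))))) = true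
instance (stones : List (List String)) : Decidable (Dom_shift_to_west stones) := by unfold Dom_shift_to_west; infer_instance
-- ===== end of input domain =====

-- B replaces A's split('#')/replace('.','')/join pipeline by a single pass per row
-- with a pending-dot counter (objective: simpler); same return value, no side effects.

-- ===== PORT A =====
-- grouped_stones + '.' * empty_size  for one '#'-free part
def swAFixPart (part : List Char) : List Char :=
  let grouped := PySem.Chars.replace part ['.'] []
  let emptySize : Int := PySem.List.len part - PySem.List.len grouped
  grouped ++ List.replicate emptySize.toNat '.'

-- the body of A's outer loop for one line
def swALine (stoneLine : List String) : List String :=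
  let strStoneLine := PySem.Chars.join [] (stoneLine.map String.toList)
  let shiftedParts :=
    (PySem.Chars.splitOn strStoneLine ['#']).foldl (fun acc part => acc ++ [swAFixPart part]) []
  let strShiftedLine := PySem.Chars.join ['#'] shiftedParts
  strShiftedLine.map (fun c => String.mk [c])

def shift_to_west (stones : List (List String)) : List (List String) :=
  (PySem.List.pyRange 0 (PySem.List.len stones)).foldl
    (fun shifted i => shifted ++ [swALine (PySem.List.pyGetD stones i [])]) []

-- ===== PORT B =====
-- one step of B's inner loop: state = (emitted output, pending dots)
def swBStep (p : List Char × Nat) (c : Char) : List Char × Nat :=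
  if c = '#' then (p.1 ++ List.replicate p.2 '.' ++ ['#'], 0)
  else if c = '.' then (p.1, p.2 + 1)
  else (p.1 ++ [c], p.2)

def swBLine (row : List String) : List String :=
  let s := (row.flatMap String.toList).foldl swBStep ([], 0)
  (s.1 ++ List.replicate s.2 '.').map (fun c => String.mk [c])

def shift_to_west_alt (stones : List (List String)) : List (List String) :=
  stones.map swBLine

-- ===== PRECONDITION & SPEC =====
def Spec_shift_to_west (stones : List (List String)) (out : List (List String)) : Prop := out = shift_to_west_alt stones
instance (stones : List (List String)) (out : List (List String)) : Decidable (Spec_shift_to_west stones out) := by unfold Spec_shift_to_west; infer_instance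

-- ===== CLAIM (what is proved, stated in full; the proofs are below) =====
def Claim_equal_shift_to_west : Prop := ∀ (stones : List (List String)), Dom_shift_to_west stones → Spec_shift_to_west stones (shift_to_west stones)

-- ===== LEMMAS AND PROOFS =====

-- pure form of A's per-line result: the segments of l split on '#', `pre` being the
-- chars of the current segment already seen
def swSegs (pre : List Char) : List Char → List (List Char)
  | [] => [pre]
  | c :: t => if c = '#' then pre :: swSegs [] t else swSegs (pre ++ [c]) t

-- pure form of B's per-line result: d = pending dots
def swF : List Char → Nat → List Char
  | [], d => List.replicate d '.'
  | c :: t, d =>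
      if c = '#' then List.replicate d '.' ++ '#' :: swF t 0
      else if c = '.' then swF t (d + 1)
      else c :: swF t d

theorem swReplaceGo (fuel : Nat) (l acc : List Char) (h : l.length ≤ fuel) :
    PySem.Chars.replace.go ['.'] [] fuel l acc = acc.reverse ++ l.filter (fun c => !(c == '.')) := by
  induction fuel generalizing l acc with
  | zero =>
    cases l with
    | nil => simp [PySem.Chars.replace.go]
    | cons c t => simp at h
  | succ n ih =>
    cases l with
    | nil => simp [PySem.Chars.replace.go]
    | cons c t =>
      simp only [List.length_cons] at h
      by_cases hc : c = '.'
      · subst hc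
        rw [show PySem.Chars.replace.go ['.'] [] (n+1) ('.' :: t) acc
              = PySem.Chars.replace.go ['.'] [] n t acc by
            simp [PySem.Chars.replace.go, List.isPrefixOf]]
        rw [ih t acc (by omega)]
        simp
      · rw [show PySem.Chars.replace.go ['.'] [] (n+1) (c :: t) acc
              = PySem.Chars.replace.go ['.'] [] n t (c :: acc) by
            simp [PySem.Chars.replace.go, List.isPrefixOf, Ne.symm hc]]
        rw [ih t (c :: acc) (by omega)]
        simp [hc]

theorem swReplaceDot (part : List Char) :
    PySem.Chars.replace part ['.'] [] = part.filter (fun c => !(c == '.')) := by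
  rw [show PySem.Chars.replace part ['.'] [] = PySem.Chars.replace.go ['.'] [] part.length part [] by
    simp [PySem.Chars.replace]]
  simpa using swReplaceGo part.length part [] le_rfl

theorem swSplitGo (fuel : Nat) (l cur : List Char) (acc : List (List Char)) (h : l.length < fuel) :
    PySem.Chars.splitOn.go ['#'] fuel l cur acc = acc.reverse ++ swSegs cur.reverse l := by
  induction fuel generalizing l cur acc with
  | zero => omega
  | succ n ih =>
    cases l with
    | nil => simp [PySem.Chars.splitOn.go, swSegs]
    | cons c t =>
      simp only [List.length_cons] at h
      by_cases hc : c = '#'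
      · subst hc
        rw [show PySem.Chars.splitOn.go ['#'] (n+1) ('#' :: t) cur acc
              = PySem.Chars.splitOn.go ['#'] n t [] (cur.reverse :: acc) by
            simp [PySem.Chars.splitOn.go, List.isPrefixOf]]
        rw [ih t [] (cur.reverse :: acc) (by omega)]
        simp [swSegs]
      · rw [show PySem.Chars.splitOn.go ['#'] (n+1) (c :: t) cur acc
              = PySem.Chars.splitOn.go ['#'] n t (c :: cur) acc by
            simp [PySem.Chars.splitOn.go, List.isPrefixOf, Ne.symm hc]]
        rw [ih t (c :: cur) acc (by omega)]
        simp [swSegs, hc]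

theorem swSplitHash (l : List Char) :
    PySem.Chars.splitOn l ['#'] = swSegs [] l := by
  rw [show PySem.Chars.splitOn l ['#'] = PySem.Chars.splitOn.go ['#'] (l.length + 1) l [] [] from rfl]
  simpa using swSplitGo (l.length + 1) l [] [] (by omega)

theorem swAFixPart_eq (part : List Char) :
    swAFixPart part = part.filter (fun c => !(c == '.')) ++ List.replicate (part.count '.') '.' := by
  have h2 : (part.filter (fun c => !(c == '.'))).length = part.countP (fun c => !(c == '.')) :=
    List.countP_eq_length_filter.symm
  have h1 : part.length = part.countP (fun c => c == '.') + part.countP (fun c => !(c == '.')) := by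
    rw [List.length_eq_countP_add_countP (fun c => c == '.')]
    congr 1
    apply List.countP_congr
    intro c _; simp
  have h3 : part.count '.' = part.countP (fun c => c == '.') := List.count_eq_countP
  unfold swAFixPart
  rw [swReplaceDot]
  simp only [PySem.List.len_eq]
  congr 2
  omega

theorem swIntercalate_cons_cons (s x y : List Char) (xs : List (List Char)) :
    List.intercalate s (x :: y :: xs) = x ++ s ++ List.intercalate s (y :: xs) := by
  simp [List.intercalate]

theorem swSegs_ne_nil (pre l : List Char) : swSegs pre l ≠ [] := by
  induction l generalizing pre with
  | nil => simp [swSegs]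
  | cons c t ih =>
    simp only [swSegs]
    split_ifs
    · simp
    · exact ih _

theorem swALineCore (l pre : List Char) :
    List.intercalate ['#'] ((swSegs pre l).map
        (fun part => part.filter (fun c => !(c == '.')) ++ List.replicate (part.count '.') '.'))
      = pre.filter (fun c => !(c == '.')) ++ swF l (pre.count '.') := by
  induction l generalizing pre with
  | nil => simp [swSegs, swF, List.intercalate]
  | cons c t ih =>
    by_cases hc : c = '#'
    · subst hc
      rw [show swSegs pre ('#' :: t) = pre :: swSegs [] t by simp [swSegs]]
      rw [List.map_cons]
      obtain ⟨y, ys, hy⟩ := List.exists_cons_of_ne_nil (l := (swSegs [] t).map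
        (fun part => part.filter (fun c => !(c == '.')) ++ List.replicate (part.count '.') '.'))
        (by simp [swSegs_ne_nil])
      rw [hy, swIntercalate_cons_cons, ← hy, ih []]
      simp [swF]
    · by_cases hd : c = '.'
      · subst hd
        simp only [swSegs, swF, if_neg hc]
        rw [ih (pre ++ ['.'])]
        simp
      · simp only [swSegs, swF, if_neg hc, if_neg hd]
        rw [ih (pre ++ [c])]
        simp [hd]

theorem swBFold (l : List Char) (acc : List Char) (d : Nat) :
    (l.foldl swBStep (acc, d)).1 ++ List.replicate (l.foldl swBStep (acc, d)).2 '.'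
      = acc ++ swF l d := by
  induction l generalizing acc d with
  | nil => simp [swF]
  | cons c t ih =>
    by_cases hc : c = '#'
    · subst hc
      simp only [List.foldl_cons, swBStep]
      rw [ih]
      simp [swF]
    · by_cases hd : c = '.'
      · subst hd
        simp only [List.foldl_cons, swBStep, if_neg hc]
        rw [ih]
        simp [swF, hc]
      · simp only [List.foldl_cons, swBStep, if_neg hc, if_neg hd]
        rw [ih]
        simp [swF, hc, hd]

theorem swJoinEmpty (parts : List (List Char)) :
    PySem.Chars.join [] parts = parts.flatten := by
  unfold PySem.Chars.join
  induction parts with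
  | nil => simp [List.intercalate]
  | cons x xs ih =>
    cases xs with
    | nil => simp [List.intercalate]
    | cons y ys =>
      rw [swIntercalate_cons_cons]
      rw [ih]
      simp

theorem swLine_eq (row : List String) : swALine row = swBLine row := by
  simp only [swALine, swBLine]
  rw [PySem.List.foldl_append_singleton_eq_map, swJoinEmpty]
  have hflat : row.flatMap String.toList = (row.map String.toList).flatten := by
    simp [List.flatMap_def]
  rw [hflat]
  set l := (row.map String.toList).flatten with hl
  congr 1
  rw [swSplitHash]
  show PySem.Chars.join ['#'] ((swSegs [] l).map swAFixPart) = _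
  have : (swSegs [] l).map swAFixPart = (swSegs [] l).map
      (fun part => part.filter (fun c => !(c == '.')) ++ List.replicate (part.count '.') '.') := by
    apply List.map_congr_left
    intro part _
    exact swAFixPart_eq part
  rw [this]
  unfold PySem.Chars.join
  rw [swALineCore l []]
  rw [swBFold l [] 0]
  simp

-- ===== VERDICT (by name: the statement is the Claim_ definition above) =====
theorem shift_to_west_spec : Claim_equal_shift_to_west := by
  intro stones _
  unfold Spec_shift_to_west shift_to_west shift_to_west_alt
  rw [PySem.List.foldl_append_singleton_eq_map]
  rw [show (fun i => swALine (PySem.List.pyGetD stones i []))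
        = (swALine ∘ fun i => PySem.List.pyGetD stones i []) from rfl]
  rw [← List.map_map, PySem.List.map_pyGetD_pyRange_zero]
  simp [swLine_eq]
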